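-- pv_equiv track=rewrite | github.com/subramani-tejas/python-algorithms | my_sclr/day_8_carry/03_smallest_subarray_min_max.py | find_all_subarrays_with_min_max
-- ===== SOURCE A (Python) =====
-- def find_all_subarrays_with_min_max(arr):
--     max_ = max(arr)
--     min_ = min(arr)
--     n = len(arr)
--     all_subarrays = []
--
--     for i in range(n):
--         if arr[i] == max_:
--             for j in range(i + 1, n):
--                 if arr[j] == min_:
--                     all_subarrays.append([i, j])
--                 # if arr[j] == max_:
--                 #     i = j
--
--         if arr[i] == min_:
--             for j in range(i + 1, n):
--                 if arr[j] == max_: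
--                     all_subarrays.append([i, j])
--                 # if arr[j] == min_:
--                 #     i = j
--
--     return all_subarrays
-- ===== SOURCE B (Python) =====
-- def find_all_subarrays_with_min_max(arr):
--     mx = max(arr)
--     mn = min(arr)
--     minpos = []   # positions j beyond the current i with arr[j] == mn, ascending
--     maxpos = []   # positions j beyond the current i with arr[j] == mx, ascending
--     blocks = []   # per-index pair blocks, collected right-to-left
--     for i in range(len(arr) - 1, -1, -1):
--         block = []
--         if arr[i] == mx:
--             block += [[i, j] for j in minpos]
--         if arr[i] == mn:
--             block += [[i, j] for j in maxpos]
--         blocks.append(block)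
--         if arr[i] == mn:
--             minpos = [i] + minpos
--         if arr[i] == mx:
--             maxpos = [i] + maxpos
--     out = []
--     for block in reversed(blocks):
--         out += block
--     return out
-- ===== Notes on version B (the rewrite author's own statement) =====
-- stated objective: alternative
-- what changed: A makes a forward pass that rescans the whole remaining suffix for every extremal index; B makes one right-to-left pass that carries the min/max position lists of the already-seen suffix as accumulators, emits each index's pair block directly from those accumulators, and assembles the output back-to-front.
import Mathlib
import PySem

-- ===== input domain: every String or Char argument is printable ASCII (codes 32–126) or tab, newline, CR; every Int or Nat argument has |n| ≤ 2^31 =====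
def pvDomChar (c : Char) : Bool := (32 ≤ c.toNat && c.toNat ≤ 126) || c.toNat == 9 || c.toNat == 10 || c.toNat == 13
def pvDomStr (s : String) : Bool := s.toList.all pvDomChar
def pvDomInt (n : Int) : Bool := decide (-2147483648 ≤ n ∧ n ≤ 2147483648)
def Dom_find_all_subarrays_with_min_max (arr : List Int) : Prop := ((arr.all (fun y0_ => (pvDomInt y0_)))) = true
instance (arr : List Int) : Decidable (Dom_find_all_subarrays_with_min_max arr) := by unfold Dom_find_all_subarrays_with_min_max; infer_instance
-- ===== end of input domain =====

-- B replaces A's forward pass with nested suffix rescans by one right-to-left pass that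
-- carries the suffix min/max position lists as accumulators and assembles the output
-- back-to-front (objective: alternative, same cost).

-- ===== PORT A =====
def find_all_subarrays_with_min_max (arr : List Int) : List (List Int) :=
  match PySem.List.max? arr (fun x => x), PySem.List.min? arr (fun x => x) with
  | some max_, some min_ =>
      let n : Int := arr.length
      (PySem.List.pyRange 0 n 1).foldl (fun acc i =>
        let acc :=
          if PySem.List.pyGetD arr i 0 = max_ then
            (PySem.List.pyRange (i + 1) n 1).foldl (fun acc j =>
              if PySem.List.pyGetD arr j 0 = min_ then acc ++ [[i, j]] else acc) acc
          else acc
        if PySem.List.pyGetD arr i 0 = min_ then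
          (PySem.List.pyRange (i + 1) n 1).foldl (fun acc j =>
            if PySem.List.pyGetD arr j 0 = max_ then acc ++ [[i, j]] else acc) acc
        else acc) []
  | _, _ => []   -- unreachable under Pre_ (Python's max() raises ValueError on the empty list)

-- ===== PORT B =====
-- loop body of Source B's right-to-left pass: state = (blocks, minpos, maxpos)
def pvStepB (arr : List Int) (mx mn : Int)
    (st : List (List (List Int)) × List Int × List Int) (i : Int) :
    List (List (List Int)) × List Int × List Int :=
  let block := (if PySem.List.pyGetD arr i 0 = mx then st.2.1.map (fun j => [i, j]) else []) ++
               (if PySem.List.pyGetD arr i 0 = mn then st.2.2.map (fun j => [i, j]) else [])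
  (st.1 ++ [block],
   if PySem.List.pyGetD arr i 0 = mn then i :: st.2.1 else st.2.1,
   if PySem.List.pyGetD arr i 0 = mx then i :: st.2.2 else st.2.2)

def find_all_subarrays_with_min_max_alt (arr : List Int) : List (List Int) :=
  -- max()/min() raise on [] in Python; the .getD 0 totalization is unreachable under Pre_
  let mx := (PySem.List.max? arr (fun x => x)).getD 0
  let mn := (PySem.List.min? arr (fun x => x)).getD 0
  let n : Int := arr.length
  let st := (PySem.List.pyRange (n - 1) (-1) (-1)).foldl (pvStepB arr mx mn) ([], [], [])
  st.1.reverse.foldl (fun out block => out ++ block) []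

-- ===== PRECONDITION & SPEC =====
-- Python's max()/min() raise ValueError on the empty list; Pre_ excludes exactly that input.
def Pre_find_all_subarrays_with_min_max (arr : List Int) : Prop := arr ≠ []
instance (arr : List Int) : Decidable (Pre_find_all_subarrays_with_min_max arr) := by unfold Pre_find_all_subarrays_with_min_max; infer_instance
def pvWitness_find_all_subarrays_with_min_max : List Int := [1, 2]

def Spec_find_all_subarrays_with_min_max (arr : List Int) (out : List (List Int)) : Prop := out = find_all_subarrays_with_min_max_alt arr
instance (arr : List Int) (out : List (List Int)) : Decidable (Spec_find_all_subarrays_with_min_max arr out) := by unfold Spec_find_all_subarrays_with_min_max; infer_instance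

-- ===== CLAIM (what is proved, stated in full; the proofs are below) =====
def Claim_equal_find_all_subarrays_with_min_max : Prop := ∀ (arr : List Int), Dom_find_all_subarrays_with_min_max arr → Pre_find_all_subarrays_with_min_max arr → Spec_find_all_subarrays_with_min_max arr (find_all_subarrays_with_min_max arr)

-- ===== LEMMAS AND PROOFS =====

-- the pair block emitted for index i, phrased on the global array (the common reference)
def pvBlock (arr : List Int) (mx mn : Int) (i : Int) : List (List Int) :=
  (if PySem.List.pyGetD arr i 0 = mx then
     ((PySem.List.pyRange (i + 1) (arr.length : Int) 1).filter
        (fun j => decide (PySem.List.pyGetD arr j 0 = mn))).map (fun j => [i, j]) else []) ++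
  (if PySem.List.pyGetD arr i 0 = mn then
     ((PySem.List.pyRange (i + 1) (arr.length : Int) 1).filter
        (fun j => decide (PySem.List.pyGetD arr j 0 = mx))).map (fun j => [i, j]) else [])

-- invariant of B's right-to-left pass over the suffix starting at s
lemma B_inv (arr : List Int) (mx mn : Int) (k : Nat) :
    ∀ s : Int, ((arr.length : Int) - s).toNat = k →
    List.foldr (fun i st => pvStepB arr mx mn st i) ([], [], [])
        (PySem.List.pyRange s (arr.length : Int) 1) =
      ((PySem.List.pyRange s (arr.length : Int) 1).reverse.map (pvBlock arr mx mn),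
       (PySem.List.pyRange s (arr.length : Int) 1).filter
         (fun j => decide (PySem.List.pyGetD arr j 0 = mn)),
       (PySem.List.pyRange s (arr.length : Int) 1).filter
         (fun j => decide (PySem.List.pyGetD arr j 0 = mx))) := by
  induction k with
  | zero =>
    intro s hs
    rw [PySem.List.pyRange_one_eq_nil (by omega)]
    simp
  | succ k ih =>
    intro s hs
    have hlt : s < (arr.length : Int) := by omega
    rw [PySem.List.pyRange_one_cons hlt, List.foldr_cons, ih (s + 1) (by omega)]
    simp only [pvStepB, pvBlock, List.filter_cons, List.reverse_cons, List.map_append,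
      List.map_cons, List.map_nil]
    split_ifs <;> simp_all

-- each step of A's outer loop appends exactly the block of its index
lemma A_step (arr : List Int) (mx mn : Int) (acc : List (List Int)) (i : Int) :
    (let acc :=
      if PySem.List.pyGetD arr i 0 = mx then
        (PySem.List.pyRange (i + 1) (arr.length : Int) 1).foldl (fun acc j =>
          if PySem.List.pyGetD arr j 0 = mn then acc ++ [[i, j]] else acc) acc
      else acc
    if PySem.List.pyGetD arr i 0 = mn then
      (PySem.List.pyRange (i + 1) (arr.length : Int) 1).foldl (fun acc j =>
        if PySem.List.pyGetD arr j 0 = mx then acc ++ [[i, j]] else acc) acc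
    else acc) = acc ++ pvBlock arr mx mn i := by
  simp only [PySem.List.foldl_append_ite (p := fun j => PySem.List.pyGetD arr j 0 = mn)
      (f := fun j => [i, j]),
    PySem.List.foldl_append_ite (p := fun j => PySem.List.pyGetD arr j 0 = mx)
      (f := fun j => [i, j]), pvBlock]
  split_ifs <;> simp

-- ===== VERDICT (by name: the statement is the Claim_ definition above) =====
theorem find_all_subarrays_with_min_max_spec : Claim_equal_find_all_subarrays_with_min_max := by
  intro arr _ hpre
  unfold Spec_find_all_subarrays_with_min_max
  rcases hmx : PySem.List.max? arr (fun x => x) with _ | mx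
  · exact absurd ((PySem.List.max?_eq_none_iff arr _).mp hmx) hpre
  rcases hmn : PySem.List.min? arr (fun x => x) with _ | mn
  · exact absurd ((PySem.List.min?_eq_none_iff arr _).mp hmn) hpre
  have hrev : PySem.List.pyRange ((arr.length : Int) - 1) (-1) (-1) =
      (PySem.List.pyRange 0 (arr.length : Int) 1).reverse := by
    rw [PySem.List.pyRange_neg_one_eq_reverse]
    norm_num
  -- B equals the flatMap of the blocks
  have hB : find_all_subarrays_with_min_max_alt arr =
      (PySem.List.pyRange 0 (arr.length : Int) 1).flatMap (pvBlock arr mx mn) := by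
    simp only [find_all_subarrays_with_min_max_alt, hmx, hmn, Option.getD_some, hrev,
      List.foldl_reverse]
    rw [B_inv arr mx mn ((arr.length : Int) - 0).toNat 0 rfl]
    simp only [List.map_reverse, List.foldr_reverse, PySem.List.foldl_append_eq_flatten,
      List.nil_append, List.flatMap]
  -- A equals the same flatMap
  rw [hB]
  simp only [find_all_subarrays_with_min_max, hmx, hmn]
  have h2 : (PySem.List.pyRange 0 (arr.length : Int) 1).foldl
      (fun acc i => acc ++ pvBlock arr mx mn i) [] =
      (PySem.List.pyRange 0 (arr.length : Int) 1).flatMap (pvBlock arr mx mn) := by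
    rw [PySem.List.foldl_append_eq_flatMap, List.nil_append]
  rw [← h2]
  apply PySem.List.foldl_congr_mem
  intro acc i _
  exact A_step arr mx mn acc i
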